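-- pv_equiv track=rewrite | github.com/open-compass/opencompass | opencompass/datasets/subjective/compass_arena.py | check_position_bias
-- ===== SOURCE A (Python) =====
-- def check_position_bias(judged_answers, references, banned_choice=['C']):
--     """Check position bias for judgellm's judgement.
--
--     Args:
--         judged_answers: The successfully extracted judgement.
--         references: The references contains original question, which is used to located the same question for different position judgement.
--     """
--     position_bias_flag = 0
--     position_bias_dict = {}
--     for judge, ref in zip(judged_answers, references):
--         question = ref['question']
--         question_hash = hash(question)
--         if question_hash not in position_bias_dict:
--             position_bias_dict[question_hash] = {
--                 'question': question,
--                 'judge': judge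
--             }
--         else:
--             first_judge = position_bias_dict[question_hash]['judge']
--             if (judge == first_judge and first_judge not in banned_choice
--                     and judge not in banned_choice):
--                 # If second choice is same with first choice, there has position bias.
--                 position_bias_flag += 1
--     return position_bias_flag
-- ===== SOURCE B (Python) =====
-- def check_position_bias(judged_answers, references, banned_choice=['C']):
--     # Two passes: group each question's judges in order, then count repeats of
--     # the group's first judge among the later judges (skipping banned firsts).
--     groups = {}
--     for judge, ref in zip(judged_answers, references):
--         groups.setdefault(hash(ref['question']), []).append(judge)
--     total = 0
--     for judges in groups.values():
--         first = judges[0]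
--         if first not in banned_choice:
--             total += judges[1:].count(first)
--     return total
-- ===== Notes on version B (the rewrite author's own statement) =====
-- stated objective: alternative
-- what changed: B separates the work into two passes: a grouping pass building, per question hash, the ordered list of its judges, then a counting pass that per group counts later judges equal to the non-banned first judge with list.count; A interleaves first-judge bookkeeping and counting in one pass over the zipped lists.
-- outside the precondition, e.g. on check_position_bias(['A'], [{}], ['C']): A raises KeyError, B raises KeyError
import Mathlib
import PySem

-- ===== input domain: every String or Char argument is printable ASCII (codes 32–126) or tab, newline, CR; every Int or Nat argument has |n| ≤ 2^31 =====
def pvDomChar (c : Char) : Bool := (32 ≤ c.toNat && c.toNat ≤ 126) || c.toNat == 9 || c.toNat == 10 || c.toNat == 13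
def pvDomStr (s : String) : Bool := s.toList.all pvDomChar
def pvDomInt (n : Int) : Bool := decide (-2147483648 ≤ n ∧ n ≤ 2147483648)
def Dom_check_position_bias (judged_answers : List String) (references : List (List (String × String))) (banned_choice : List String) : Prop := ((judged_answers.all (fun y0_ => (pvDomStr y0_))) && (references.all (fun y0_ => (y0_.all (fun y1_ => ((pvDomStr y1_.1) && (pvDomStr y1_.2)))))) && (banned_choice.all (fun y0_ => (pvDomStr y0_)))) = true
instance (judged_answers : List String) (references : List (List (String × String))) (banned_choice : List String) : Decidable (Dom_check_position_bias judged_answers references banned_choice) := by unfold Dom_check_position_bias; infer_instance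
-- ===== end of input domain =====

-- B replaces A's single interleaved pass by a grouping pass (question -> ordered judges) followed by a counting pass over the groups; same result, same cost.


-- ===== PORT A =====
-- grouping keys: Python hashes the question string; the port keys the dict by the question itself (exact unless two distinct questions collide under hash, which the Python's correctness itself assumes away)
def check_position_bias (judged_answers : List String) (references : List (List (String × String))) (banned_choice : List String) : Int :=
  (List.foldl
    (fun (st : Int × PySem.Dict String (String × String)) (p : String × List (String × String)) =>
      let question : String := (PySem.Dict.get? (⟨p.2⟩ : PySem.Dict String String) "question").getD ""  -- ref['question']; Pre_ makes the key present
      if st.2.contains question = false then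
        (st.1, st.2.insert question (question, p.1))
      else
        let first_judge : String := (st.2.getD question ("", "")).2
        if p.1 == first_judge && !(banned_choice.contains first_judge) && !(banned_choice.contains p.1) then
          (st.1 + 1, st.2)
        else st)
    (0, PySem.Dict.empty) (judged_answers.zip references)).1

-- ===== PORT B =====
def check_position_bias_alt (judged_answers : List String) (references : List (List (String × String))) (banned_choice : List String) : Int :=
  let groups : PySem.Dict String (List String) :=
    (judged_answers.zip references).foldl
      (fun d p => d.modify ((PySem.Dict.get? (⟨p.2⟩ : PySem.Dict String String) "question").getD "") [] (· ++ [p.1]))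
      PySem.Dict.empty
  groups.values.foldl
    (fun total judges =>
      match judges with
      | [] => total
      | first :: rest =>
        if banned_choice.contains first then total
        else total + (rest.count first : Int))
    0

-- ===== PRECONDITION & SPEC =====
-- Pre_ excludes exactly the inputs where some reference paired with a judged answer lacks the 'question' key: there the Python A raises KeyError (and B raises too).
def Pre_check_position_bias (judged_answers : List String) (references : List (List (String × String))) (banned_choice : List String) : Prop :=
  (judged_answers.zip references).all
    (fun p => (PySem.Dict.get? (⟨p.2⟩ : PySem.Dict String String) "question").isSome) = true
instance (judged_answers : List String) (references : List (List (String × String))) (banned_choice : List String) : Decidable (Pre_check_position_bias judged_answers references banned_choice) := by unfold Pre_check_position_bias; infer_instance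
def pvWitness_check_position_bias : List String × (List (List (String × String))) × List String :=
  (["A", "A"], ([[("question", "q")], [("question", "q")]], ["C"]))
def Spec_check_position_bias (judged_answers : List String) (references : List (List (String × String))) (banned_choice : List String) (out : Int) : Prop := out = check_position_bias_alt judged_answers references banned_choice
instance (judged_answers : List String) (references : List (List (String × String))) (banned_choice : List String) (out : Int) : Decidable (Spec_check_position_bias judged_answers references banned_choice out) := by unfold Spec_check_position_bias; infer_instance

-- ===== CLAIM (what is proved, stated in full; the proofs are below) =====
def Claim_equal_check_position_bias : Prop := ∀ (judged_answers : List String) (references : List (List (String × String))) (banned_choice : List String), Dom_check_position_bias judged_answers references banned_choice → Pre_check_position_bias judged_answers references banned_choice → Spec_check_position_bias judged_answers references banned_choice (check_position_bias judged_answers references banned_choice)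

-- ===== LEMMAS AND PROOFS =====

-- the (question, judge) pairs both ports walk over
def qjPairs (judged_answers : List String) (references : List (List (String × String))) : List (String × String) :=
  (judged_answers.zip references).map
    (fun p => ((PySem.Dict.get? (⟨p.2⟩ : PySem.Dict String String) "question").getD "", p.1))

def stepA (banned : List String) (st : Int × PySem.Dict String (String × String)) (x : String × String) :
    Int × PySem.Dict String (String × String) :=
  if st.2.contains x.1 = false then
    (st.1, st.2.insert x.1 (x.1, x.2))
  else
    if x.2 == (st.2.getD x.1 ("", "")).2 && !(banned.contains (st.2.getD x.1 ("", "")).2) && !(banned.contains x.2) then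
      (st.1 + 1, st.2)
    else st

def grp (l : List (String × String)) (q : String) : List String :=
  (l.filter (fun p => p.1 == q)).map (·.2)

def cnt (banned : List String) (js : List String) : Int :=
  match js with
  | [] => 0
  | f :: rest => if banned.contains f then 0 else (rest.count f : Int)

def bsum (banned : List String) (l : List (String × String)) : Int :=
  ((PySem.Set.ofList (l.map (·.1))).map (fun q => cnt banned (grp l q))).sum

lemma portA_eq (ja : List String) (refs : List (List (String × String))) (b : List String) :
    check_position_bias ja refs b = ((qjPairs ja refs).foldl (stepA b) (0, PySem.Dict.empty)).1 := by
  simp [check_position_bias, qjPairs, List.foldl_map, stepA]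


lemma foldl_cnt (b : List String) (vs : List (List String)) (t : Int) :
    vs.foldl (fun total judges => match judges with
      | [] => total
      | first :: rest => if b.contains first then total else total + (rest.count first : Int)) t
    = t + (vs.map (cnt b)).sum := by
  have h : (fun (total : Int) (judges : List String) => match judges with
      | [] => total
      | first :: rest => if b.contains first then total else total + (rest.count first : Int))
      = fun total judges => total + cnt b judges := by
    funext t js
    cases js with
    | nil => simp [cnt]
    | cons f rest => simp only [cnt]; split <;> simp
  rw [h]
  induction vs generalizing t with
  | nil => simp
  | cons v vs ih =>
    rw [List.foldl_cons, ih]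
    simp
    ring

lemma portB_eq (ja : List String) (refs : List (List (String × String))) (b : List String) :
    check_position_bias_alt ja refs b = bsum b (qjPairs ja refs) := by
  have hfold : (ja.zip refs).foldl
      (fun d p => d.modify ((PySem.Dict.get? (⟨p.2⟩ : PySem.Dict String String) "question").getD "") [] (· ++ [p.1]))
      PySem.Dict.empty
      = (qjPairs ja refs).foldl (fun d x => d.modify x.1 [] (· ++ [x.2])) PySem.Dict.empty := by
    simp [qjPairs, List.foldl_map]
  unfold check_position_bias_alt
  rw [hfold]
  set l := qjPairs ja refs with hl
  set g := l.foldl (fun d x => d.modify x.1 [] (· ++ [x.2])) PySem.Dict.empty with hg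
  show g.values.foldl _ 0 = bsum b l
  have hnd : g.keys.Nodup :=
    PySem.Dict.nodup_keys_foldl_modify_key l (fun x => x.1) [] (fun d x => (· ++ [x.2]))
      PySem.Dict.empty (by simp [PySem.Dict.keys_empty])
  have hkeys : g.keys = PySem.Set.ofList (l.map (·.1)) := by
    rw [hg, PySem.Dict.keys_foldl_modify_key]
    simp [PySem.Dict.keys_empty, PySem.Set.update_nil_left]
  have hget : ∀ q, g.getD q [] = grp l q := by
    intro q
    rw [hg, PySem.Dict.getD_foldl_modify_append]
    simp [PySem.Dict.getD_empty, grp]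
  rw [foldl_cnt]
  rw [PySem.Dict.values_eq_map_keys g hnd []]
  simp only [List.map_map, Function.comp_def, hget, hkeys]
  simp [bsum]

lemma grp_append_singleton (l : List (String × String)) (x : String × String) (q : String) :
    grp (l ++ [x]) q = grp l q ++ (if x.1 == q then [x.2] else []) := by
  simp only [grp, List.filter_append, List.map_append]
  congr 1
  by_cases h : x.1 == q <;> simp [h]

lemma grp_eq_nil_iff (l : List (String × String)) (q : String) :
    grp l q = [] ↔ q ∉ l.map (·.1) := by
  simp only [grp, List.map_eq_nil_iff, List.filter_eq_nil_iff, List.mem_map]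
  constructor
  · rintro h ⟨p, hp, rfl⟩
    exact absurd (by simp) (h p hp)
  · intro h p hp
    simp only [beq_iff_eq]
    intro hq
    exact h ⟨p, hp, hq⟩

lemma sum_map_update {α : Type} [DecidableEq α] (S : List α) (q : α) (f g : α → Int)
    (hnd : S.Nodup) (hq : q ∈ S) (h : ∀ r ∈ S, r ≠ q → f r = g r) :
    (S.map f).sum = (S.map g).sum + (f q - g q) := by
  induction S with
  | nil => simp at hq
  | cons a S ih =>
    rcases List.mem_cons.mp hq with rfl | hmem
    · have : S.map f = S.map g := by
        apply List.map_congr_left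
        intro r hr
        exact h r (List.mem_cons_of_mem _ hr) (fun hrq => (List.nodup_cons.mp hnd).1 (hrq ▸ hr))
      simp [this]; ring
    · have ha : f a = g a := h a (List.mem_cons_self) (fun haq => (List.nodup_cons.mp hnd).1 (haq ▸ hmem))
      rw [List.map_cons, List.map_cons, List.sum_cons, List.sum_cons, ha,
        ih (List.nodup_cons.mp hnd).2 hmem (fun r hr => h r (List.mem_cons_of_mem _ hr))]
      ring

lemma cnt_singleton (b : List String) (j : String) : cnt b [j] = 0 := by
  simp only [cnt]
  split <;> simp

lemma cnt_append_singleton (b : List String) (f : String) (rest : List String) (j : String) :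
    cnt b ((f :: rest) ++ [j]) = cnt b (f :: rest) + (if !(b.contains f) && (j == f) then 1 else 0) := by
  simp only [cnt, List.cons_append, List.count_append]
  by_cases hb : f ∈ b <;> by_cases hj : j = f <;>
    simp [hb, hj, List.count_cons] <;> push_cast <;> ring

lemma afold_spec (b : List String) (l : List (String × String)) :
    (l.foldl (stepA b) (0, PySem.Dict.empty)).1 = bsum b l ∧
    ∀ q, (l.foldl (stepA b) (0, PySem.Dict.empty)).2.get? q = (grp l q).head?.map (fun j => (q, j)) := by
  induction l using List.reverseRecOn with
  | nil =>
    constructor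
    · simp [bsum]
    · intro q
      simp [grp, PySem.Dict.get?_empty]
  | append_singleton l x ih =>
    obtain ⟨ihf, ihd⟩ := ih
    rw [List.foldl_append]
    simp only [List.foldl_cons, List.foldl_nil]
    set S := l.foldl (stepA b) (0, PySem.Dict.empty) with hS
    have hcont : S.2.contains x.1 = ((grp l x.1).head?.map (fun j => (x.1, j))).isSome := by
      rw [PySem.Dict.contains_eq_isSome_get?, ihd x.1]
    cases hjs : grp l x.1 with
    | nil =>
      -- first occurrence of this question: insert, flag unchanged
      have hnotmem : x.1 ∉ l.map (·.1) := (grp_eq_nil_iff l x.1).mp hjs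
      have hstep : stepA b S x = (S.1, S.2.insert x.1 (x.1, x.2)) := by
        rw [stepA]
        simp [hcont, hjs]
      rw [hstep]
      constructor
      · rw [ihf]
        simp only [bsum, List.map_append, List.map_cons, List.map_nil,
          PySem.Set.ofList_append_singleton]
        rw [PySem.Set.add_of_not_mem (fun h => hnotmem ((PySem.Set.mem_ofList _ _).mp h))]
        rw [List.map_append, List.sum_append]
        have h1 : (PySem.Set.ofList (l.map (·.1))).map (fun q => cnt b (grp (l ++ [x]) q))
            = (PySem.Set.ofList (l.map (·.1))).map (fun q => cnt b (grp l q)) := by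
          apply List.map_congr_left
          intro r hr
          have hrne : x.1 ≠ r := by
            rintro rfl
            exact hnotmem ((PySem.Set.mem_ofList _ _).mp hr)
          show cnt b (grp (l ++ [x]) r) = cnt b (grp l r)
          rw [grp_append_singleton]
          simp [hrne]
        rw [h1]
        have h2 : grp (l ++ [x]) x.1 = [x.2] := by
          rw [grp_append_singleton, hjs]
          simp
        simp [h2, cnt_singleton]
      · intro q
        rw [PySem.Dict.get?_insert, grp_append_singleton]
        by_cases hq : q = x.1
        · subst hq
          simp [hjs]
        · have hxq : x.1 ≠ q := fun h => hq h.symm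
          simp [hq, hxq, ihd q]
    | cons f rest =>
      -- the question was seen before, first judge f
      have hmem : x.1 ∈ l.map (·.1) := by
        by_contra hnm
        rw [(grp_eq_nil_iff l x.1).mpr hnm] at hjs
        simp at hjs
      have hgetD : S.2.getD x.1 ("", "") = (x.1, f) := by
        rw [PySem.Dict.getD_eq_get?_getD, ihd x.1, hjs]
        simp
      have hstep : stepA b S x =
          (if x.2 == f && !(b.contains f) && !(b.contains x.2) then (S.1 + 1, S.2) else S) := by
        rw [stepA]
        simp [hcont, hjs, hgetD]
      have hbs : bsum b (l ++ [x]) = bsum b l + (if !(b.contains f) && (x.2 == f) then 1 else 0) := by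
        simp only [bsum, List.map_append, List.map_cons, List.map_nil,
          PySem.Set.ofList_append_singleton,
          PySem.Set.add_of_mem ((PySem.Set.mem_ofList _ _).mpr hmem)]
        rw [sum_map_update (PySem.Set.ofList (l.map (·.1))) x.1
          (fun q => cnt b (grp (l ++ [x]) q)) (fun q => cnt b (grp l q))
          (PySem.Set.nodup_ofList _) ((PySem.Set.mem_ofList _ _).mpr hmem)
          (by
            intro r hr hrne
            have hxr : x.1 ≠ r := fun h => hrne h.symm
            show cnt b (grp (l ++ [x]) r) = cnt b (grp l r)
            rw [grp_append_singleton]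
            simp [hxr])]
        rw [grp_append_singleton, hjs]
        simp only [BEq.rfl, if_true]
        rw [cnt_append_singleton]
        ring
      constructor
      · rw [hstep, hbs]
        by_cases hxf : x.2 = f
        · subst hxf
          by_cases hbf : x.2 ∈ b
          · simp [hbf, ihf]
          · simp [hbf, ihf]
        · simp [hxf, ihf]
      · intro q
        have hdict : (stepA b S x).2 = S.2 := by
          rw [hstep]
          split <;> rfl
        rw [hdict, ihd q, grp_append_singleton]
        by_cases hq : x.1 = q
        · subst hq
          rw [hjs]
          simp
        · simp [hq]

-- ===== VERDICT (by name: the statement is the Claim_ definition above) =====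
theorem check_position_bias_spec : Claim_equal_check_position_bias := by
  intro ja refs b _ _
  unfold Spec_check_position_bias
  rw [portA_eq, portB_eq, (afold_spec b (qjPairs ja refs)).1]
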